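-- pv_equiv track=rewrite | github.com/tjthejuggler/tail | habitdb_analyzer/habitdb_streak_finder.py | get_days_since_not_zero
-- ===== SOURCE A (Python) =====
-- def get_days_since_not_zero(inner_dict, target_date):
--     days_since_not_zero = None
--     sorted_dates = [d for d in inner_dict.keys() if d <= target_date]
--     sorted_dates.sort(reverse=True)
--     for index, date_str in enumerate(sorted_dates):
--         if inner_dict[date_str] != 0:
--             days_since_not_zero = index
--             break
--     if days_since_not_zero is None:
--         days_since_not_zero = len(sorted_dates)
--     return days_since_not_zero
-- ===== SOURCE B (Python) =====
-- def get_days_since_not_zero(inner_dict, target_date):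
--     # one linear pass: largest date <= target with nonzero value
--     best = None
--     for date_str, value in inner_dict.items():
--         if value != 0 and date_str <= target_date and (best is None or date_str > best):
--             best = date_str
--     if best is None:
--         return sum(1 for d in inner_dict if d <= target_date)
--     return sum(1 for d in inner_dict if best < d <= target_date)
-- ===== Notes on version B (the rewrite author's own statement) =====
-- stated objective: alternative
-- what changed: Replaces A's filter-sort-descending-then-scan (O(n log n)) by a single linear pass that finds the maximum nonzero-valued date <= target and then counts dates between it and the target; no sorting.
import Mathlib
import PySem

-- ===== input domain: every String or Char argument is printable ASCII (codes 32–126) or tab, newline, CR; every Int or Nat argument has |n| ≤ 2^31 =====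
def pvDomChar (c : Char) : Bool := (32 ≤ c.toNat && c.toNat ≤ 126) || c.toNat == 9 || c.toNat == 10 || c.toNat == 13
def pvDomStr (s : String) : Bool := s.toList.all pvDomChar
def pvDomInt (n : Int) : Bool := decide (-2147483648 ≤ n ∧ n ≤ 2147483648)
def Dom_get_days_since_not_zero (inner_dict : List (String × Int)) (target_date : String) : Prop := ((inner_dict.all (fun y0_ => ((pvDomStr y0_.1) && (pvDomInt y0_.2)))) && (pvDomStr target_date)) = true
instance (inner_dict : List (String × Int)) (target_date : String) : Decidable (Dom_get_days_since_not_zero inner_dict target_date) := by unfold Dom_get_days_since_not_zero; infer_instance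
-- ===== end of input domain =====

-- B replaces A's filter/sort-descending/scan by a single linear pass (max nonzero date <= target, then a count); alternative algorithm, no sorting, equal return value.


-- ===== PORT A =====
-- 'for index, date_str in enumerate(sorted_dates): if inner_dict[date_str] != 0: … break'
def pvScanLoop (d : PySem.Dict String Int) : List String → Int → Option Int
  | [], _ => none
  | x :: rest, i => if d.getD x 0 ≠ 0 then some i else pvScanLoop d rest (i + 1)

def get_days_since_not_zero (inner_dict : List (String × Int)) (target_date : String) : Int :=
  let d := PySem.Dict.ofList inner_dict
  let sorted_dates := PySem.List.sorted (d.keys.filter (fun s => decide (s ≤ target_date))) (fun x => x) true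
  match pvScanLoop d sorted_dates 0 with
  | some i => i
  | none => (sorted_dates.length : Int)

-- ===== PORT B =====
def get_days_since_not_zero_alt (inner_dict : List (String × Int)) (target_date : String) : Int :=
  let d := PySem.Dict.ofList inner_dict
  let best := d.items.foldl (fun b p =>
      if (decide (p.2 ≠ 0) && decide (p.1 ≤ target_date) &&
          (match b with | none => true | some m => decide (m < p.1)))
      then some p.1 else b) none
  match best with
  | none => (d.keys.countP (fun k => decide (k ≤ target_date)) : Int)
  | some m => (d.keys.countP (fun k => decide (m < k) && decide (k ≤ target_date)) : Int)

-- ===== PRECONDITION & SPEC =====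
def Spec_get_days_since_not_zero (inner_dict : List (String × Int)) (target_date : String) (out : Int) : Prop := out = get_days_since_not_zero_alt inner_dict target_date
instance (inner_dict : List (String × Int)) (target_date : String) (out : Int) : Decidable (Spec_get_days_since_not_zero inner_dict target_date out) := by unfold Spec_get_days_since_not_zero; infer_instance

-- ===== CLAIM (what is proved, stated in full; the proofs are below) =====
def Claim_equal_get_days_since_not_zero : Prop := ∀ (inner_dict : List (String × Int)) (target_date : String), Dom_get_days_since_not_zero inner_dict target_date → Spec_get_days_since_not_zero inner_dict target_date (get_days_since_not_zero inner_dict target_date)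

-- ===== LEMMAS AND PROOFS =====

-- A's scan finds nothing when every listed date has value 0
theorem pvScanLoop_none (d : PySem.Dict String Int) (L : List String)
    (h : ∀ x ∈ L, d.getD x 0 = 0) : ∀ i, pvScanLoop d L i = none := by
  induction L with
  | nil => intro i; rfl
  | cons x rest ih =>
    intro i
    have hx := h x (by simp)
    simp [pvScanLoop, hx]
    exact ih (fun y hy => h y (by simp [hy])) (i + 1)

-- A's scan on a strictly descending list with a maximal nonzero element m
-- returns the number of elements larger than m
theorem pvScanLoop_max (d : PySem.Dict String Int) (m : String) :
    ∀ (L : List String) (i : Int), L.Pairwise (fun a b => b < a) → m ∈ L →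
    d.getD m 0 ≠ 0 → (∀ x ∈ L, d.getD x 0 ≠ 0 → x ≤ m) →
    pvScanLoop d L i = some (i + (L.countP (fun x => decide (m < x)) : Int)) := by
  intro L
  induction L with
  | nil => intro i _ hm; cases hm
  | cons x rest ih =>
    intro i hpw hm hnz hmax
    have hpw_tail : rest.Pairwise (fun a b => b < a) := hpw.tail
    have hlt : ∀ y ∈ rest, y < x := by
      intro y hy; exact (List.pairwise_cons.mp hpw).1 y hy
    by_cases hx : d.getD x 0 ≠ 0
    · -- first element is nonzero: m must be x
      have hxm : x ≤ m := hmax x (by simp) hx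
      have hmx : m = x := by
        rcases List.mem_cons.mp hm with hm' | hm'
        · exact hm'
        · exact absurd (hlt m hm') (not_lt.mpr hxm)
      subst hmx
      have hcount : (m :: rest).countP (fun x => decide (m < x)) = 0 := by
        rw [List.countP_eq_zero]
        intro y hy
        simp only [decide_eq_true_eq]
        rcases List.mem_cons.mp hy with hy' | hy'
        · rw [hy']; exact lt_irrefl m
        · exact not_lt.mpr (le_of_lt (hlt y hy'))
      rw [hcount]
      simp [pvScanLoop, hx]
    · -- first element is zero: recurse
      have hx0 : d.getD x 0 = 0 := by
        by_contra h0; exact hx h0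
      have hmem : m ∈ rest := by
        rcases List.mem_cons.mp hm with hm' | hm'
        · exact absurd hnz (by rw [hm']; simp [hx0])
        · exact hm'
      have hrec := ih (i + 1) hpw_tail hmem hnz
        (fun y hy hynz => hmax y (List.mem_cons_of_mem x hy) hynz)
      have hmx : m < x := hlt m hmem
      have hcount : (x :: rest).countP (fun y => decide (m < y))
          = rest.countP (fun y => decide (m < y)) + 1 := by
        rw [List.countP_cons, decide_eq_true hmx]
        simp
      simp only [pvScanLoop, hx0]
      simp only [ne_eq, not_true_eq_false, if_false, hrec, hcount]
      congr 1
      push_cast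
      ring

-- characterisation of B's running-max fold
theorem pvBestFold_char (t : String) :
    ∀ (l : List (String × Int)) (b : Option String),
    (l.foldl (fun b p =>
      if (decide (p.2 ≠ 0) && decide (p.1 ≤ t) &&
          (match b with | none => true | some m => decide (m < p.1)))
      then some p.1 else b) b = none →
        b = none ∧ ∀ p ∈ l, ¬(p.2 ≠ 0 ∧ p.1 ≤ t)) ∧
    (∀ m, l.foldl (fun b p =>
      if (decide (p.2 ≠ 0) && decide (p.1 ≤ t) &&
          (match b with | none => true | some m => decide (m < p.1)))
      then some p.1 else b) b = some m →
        (b = some m ∨ ∃ v, (m, v) ∈ l ∧ v ≠ 0 ∧ m ≤ t) ∧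
        (∀ x, b = some x → x ≤ m) ∧
        (∀ p ∈ l, p.2 ≠ 0 → p.1 ≤ t → p.1 ≤ m)) := by
  intro l
  induction l with
  | nil =>
    intro b
    refine ⟨fun h => ⟨by simpa using h, by simp⟩, fun m h => ?_⟩
    simp only [List.foldl_nil] at h
    exact ⟨Or.inl h, fun x hx => le_of_eq (Option.some_injective _ (hx.symm.trans h)), by simp⟩
  | cons p l ih =>
    intro b
    set c : Bool := (decide (p.2 ≠ 0) && decide (p.1 ≤ t) &&
        (match b with | none => true | some m => decide (m < p.1))) with hc
    have hstep : ∀ (r : Option String),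
        (p :: l).foldl (fun b q =>
          if (decide (q.2 ≠ 0) && decide (q.1 ≤ t) &&
              (match b with | none => true | some m => decide (m < q.1)))
          then some q.1 else b) b
        = l.foldl (fun b q =>
          if (decide (q.2 ≠ 0) && decide (q.1 ≤ t) &&
              (match b with | none => true | some m => decide (m < q.1)))
          then some q.1 else b) (if c then some p.1 else b) := by
      intro r; simp [List.foldl_cons, hc]
    constructor
    · intro h
      rw [hstep none] at h
      obtain ⟨hb', hall⟩ := (ih _).1 h
      by_cases hcc : c = true
      · rw [hcc] at hb'; simp at hb'
      · have hb : b = none := by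
          by_contra hbn
          rw [if_neg (by simp [hcc])] at hb'
          exact hbn hb'
        refine ⟨hb, fun q hq => ?_⟩
        rcases List.mem_cons.mp hq with hq' | hq'
        · subst hq'
          intro ⟨h1, h2⟩
          apply hcc
          simp [hc, hb, h1, h2]
        · exact hall q hq'
    · intro m h
      rw [hstep none] at h
      obtain ⟨h1, h2, h3⟩ := (ih _).2 m h
      by_cases hcc : c = true
      · -- condition fired: accumulator became some p.1
        rw [if_pos hcc] at h1 h2
        have hp2 : p.2 ≠ 0 := by
          simp only [hc, Bool.and_eq_true, decide_eq_true_eq] at hcc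
          exact hcc.1.1
        have hp1 : p.1 ≤ t := by
          simp only [hc, Bool.and_eq_true, decide_eq_true_eq] at hcc
          exact hcc.1.2
        have hpm : p.1 ≤ m := h2 p.1 rfl
        refine ⟨?_, fun x hx => ?_, fun q hq hq2 hq1 => ?_⟩
        · rcases h1 with h1 | ⟨v, hv, hv0, hvt⟩
          · right; exact ⟨p.2, by simp [← (Option.some_injective _ h1)], hp2,
              (Option.some_injective _ h1) ▸ hp1⟩
          · right; exact ⟨v, by simp [hv], hv0, hvt⟩
        · -- b = some x → x ≤ m
          have : decide (x < p.1) = true := by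
            simp only [hc, hx, Bool.and_eq_true] at hcc
            exact hcc.2
          exact le_of_lt (lt_of_lt_of_le (of_decide_eq_true this) hpm)
        · rcases List.mem_cons.mp hq with hq' | hq'
          · subst hq'; exact hpm
          · exact h3 q hq' hq2 hq1
      · rw [if_neg (by simp [hcc])] at h1 h2
        refine ⟨?_, h2, fun q hq hq2 hq1 => ?_⟩
        · rcases h1 with h1 | ⟨v, hv, hv0, hvt⟩
          · exact Or.inl h1
          · exact Or.inr ⟨v, by simp [hv], hv0, hvt⟩
        · rcases List.mem_cons.mp hq with hq' | hq'
          · subst hq'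
            -- condition false but q satisfies first two conjuncts: b = some x with ¬ x < q.1
            rcases hb : b with _ | x
            · exfalso; apply hcc; simp [hc, hb, hq2, hq1]
            · have hxq : ¬ (x < q.1) := by
                intro hlt
                apply hcc
                simp [hc, hb, hq2, hq1, hlt]
              exact le_trans (not_lt.mp hxq) (h2 x hb)
          · exact h3 q hq' hq2 hq1

-- main equivalence, with the dict abstracted
theorem pv_main (inner_dict : List (String × Int)) (t : String) :
    get_days_since_not_zero inner_dict t = get_days_since_not_zero_alt inner_dict t := by
  unfold get_days_since_not_zero get_days_since_not_zero_alt
  set d := PySem.Dict.ofList inner_dict with hd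
  have hn : d.keys.Nodup := by rw [hd]; exact PySem.Dict.nodup_keys_ofList inner_dict
  set F := d.keys.filter (fun s => decide (s ≤ t)) with hF
  set L := PySem.List.sorted F (fun x => x) true with hL
  have hperm : L.Perm F := PySem.List.sorted_perm F (fun x => x) true
  have hFnodup : F.Nodup := hn.filter _
  have hLnodup : L.Nodup := hperm.nodup_iff.mpr hFnodup
  have hpair : L.Pairwise (fun a b => b ≤ a) := PySem.List.sorted_pairwise_rev F (fun x => x)
  have hpw : L.Pairwise (fun a b => b < a) :=
    (hpair.and hLnodup).imp (fun h => lt_of_le_of_ne h.1 (Ne.symm h.2))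
  have hitems : d.items = d.keys.map (fun k => (k, d.getD k 0)) :=
    PySem.Dict.items_eq_map_keys d hn 0
  have hmemF : ∀ k, k ∈ F ↔ (k ∈ d.keys ∧ k ≤ t) := by
    intro k; rw [hF, List.mem_filter]; simp
  show (match pvScanLoop d L 0 with
        | some i => i
        | none => (L.length : Int))
      = (match d.items.foldl (fun b p =>
            if (decide (p.2 ≠ 0) && decide (p.1 ≤ t) &&
                (match b with | none => true | some m => decide (m < p.1)))
            then some p.1 else b) none with
        | none => (d.keys.countP (fun k => decide (k ≤ t)) : Int)
        | some m => (d.keys.countP (fun k => decide (m < k) && decide (k ≤ t)) : Int))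
  obtain ⟨charNone, charSome⟩ := pvBestFold_char t d.items none
  cases hbest : d.items.foldl (fun b p =>
      if (decide (p.2 ≠ 0) && decide (p.1 ≤ t) &&
          (match b with | none => true | some m => decide (m < p.1)))
      then some p.1 else b) none with
  | none =>
    obtain ⟨-, hall⟩ := charNone hbest
    have hzero : ∀ x ∈ L, d.getD x 0 = 0 := by
      intro x hxL
      have hxF : x ∈ F := (PySem.List.mem_sorted F (fun y => y) true x).mp hxL
      obtain ⟨hxK, hxt⟩ := (hmemF x).mp hxF
      have hxi : (x, d.getD x 0) ∈ d.items := by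
        rw [hitems]; exact List.mem_map.mpr ⟨x, hxK, rfl⟩
      by_contra h0
      exact hall _ hxi ⟨h0, hxt⟩
    rw [pvScanLoop_none d L hzero 0]
    have hlen : L.length = d.keys.countP (fun k => decide (k ≤ t)) := by
      rw [hperm.length_eq, hF, ← List.countP_eq_length_filter]
    show (L.length : Int) = (d.keys.countP (fun k => decide (k ≤ t)) : Int)
    exact_mod_cast congrArg Nat.cast hlen
  | some m =>
    obtain ⟨hsrc, -, hmax⟩ := charSome m hbest
    have hex : ∃ v, (m, v) ∈ d.items ∧ v ≠ 0 ∧ m ≤ t := by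
      rcases hsrc with h | h
      · exact absurd h (by simp)
      · exact h
    obtain ⟨v, hmv, hv0, hmt⟩ := hex
    have hgm : d.getD m 0 = v := PySem.Dict.getD_of_mem_items d hmv hn 0
    have hmnz : d.getD m 0 ≠ 0 := by rw [hgm]; exact hv0
    have hmK : m ∈ d.keys := PySem.Dict.mem_keys_of_mem_items d hmv
    have hmL : m ∈ L := (PySem.List.mem_sorted F (fun y => y) true m).mpr ((hmemF m).mpr ⟨hmK, hmt⟩)
    have hmaxL : ∀ x ∈ L, d.getD x 0 ≠ 0 → x ≤ m := by
      intro x hxL hxnz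
      have hxF : x ∈ F := (PySem.List.mem_sorted F (fun y => y) true x).mp hxL
      obtain ⟨hxK, hxt⟩ := (hmemF x).mp hxF
      have hxi : (x, d.getD x 0) ∈ d.items := by
        rw [hitems]; exact List.mem_map.mpr ⟨x, hxK, rfl⟩
      exact hmax _ hxi hxnz hxt
    rw [pvScanLoop_max d m L 0 hpw hmL hmnz hmaxL]
    have hcnt : L.countP (fun x => decide (m < x))
        = d.keys.countP (fun k => decide (m < k) && decide (k ≤ t)) := by
      rw [hperm.countP_eq, hF, List.countP_filter]
    show (0 + (L.countP (fun x => decide (m < x)) : Int))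
        = (d.keys.countP (fun k => decide (m < k) && decide (k ≤ t)) : Int)
    rw [hcnt]
    ring

-- ===== VERDICT (by name: the statement is the Claim_ definition above) =====
theorem get_days_since_not_zero_spec : Claim_equal_get_days_since_not_zero := by
  intro inner_dict target_date _
  exact pv_main inner_dict target_date
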